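-- pv_equiv track=rewrite | github.com/theoserrano/Projeto-Flyfood | main.py | gerar_caminhos
-- ===== SOURCE A (Python) =====
-- def permutacoes_chaves(lista_chaves):
--     if len(lista_chaves) == 0:
--         return [[]]
--
--     resultado = []
--     for i in range(len(lista_chaves)):
--         elemento = lista_chaves[i]
--         restantes = lista_chaves[:i] + lista_chaves[i+1:]
--         for perm in permutacoes_chaves(restantes):
--             resultado.append([elemento] + perm)
--
--     return resultado
--
-- def gerar_caminhos(pares_ord):
--     pontos_intermediarios = []
--     for p in pares_ord:
--         if p != 'R':
--             pontos_intermediarios.append(p)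
--
--     caminhos_intermediarios = permutacoes_chaves(pontos_intermediarios)
--
--     caminhos_completos = []
--     for caminho in caminhos_intermediarios:
--         caminhos_completos.append(['R'] + caminho + ['R'])
--
--     return caminhos_completos
-- ===== SOURCE B (Python) =====
-- def gerar_caminhos(pares_ord):
--     pontos = [p for p in pares_ord if p != 'R']
--     n = len(pontos)
--     total = 1
--     for i in range(1, n + 1):
--         total *= i
--     caminhos = []
--     for k in range(total):
--         restantes = pontos[:]
--         perm = ['R']
--         f = total
--         m = n
--         while m > 0:
--             f //= m
--             d, k = divmod(k, f)
--             perm.append(restantes.pop(d))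
--             m -= 1
--         perm.append('R')
--         caminhos.append(perm)
--     return caminhos
-- ===== Notes on version B (the rewrite author's own statement) =====
-- stated objective: alternative
-- what changed: Replaced the recursive slice-and-concatenate permutation generator with an iterative factorial-number-system unranking loop that builds the k-th permutation directly for each k in range(n!).
import Mathlib
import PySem

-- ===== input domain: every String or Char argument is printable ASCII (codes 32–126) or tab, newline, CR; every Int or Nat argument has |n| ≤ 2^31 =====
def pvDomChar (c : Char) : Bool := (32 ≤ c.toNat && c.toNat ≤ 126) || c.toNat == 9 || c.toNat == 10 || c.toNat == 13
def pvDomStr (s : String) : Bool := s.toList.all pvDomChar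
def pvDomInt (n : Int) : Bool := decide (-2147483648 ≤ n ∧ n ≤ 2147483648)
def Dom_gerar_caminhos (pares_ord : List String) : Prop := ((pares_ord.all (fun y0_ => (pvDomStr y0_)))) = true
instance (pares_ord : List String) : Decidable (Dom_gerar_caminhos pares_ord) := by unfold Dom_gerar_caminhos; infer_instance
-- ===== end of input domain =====

-- B replaces A's recursive slice-and-concatenate permutation generator by factorial-number-system
-- unranking (one direct construction per rank k in range(n!)); same output, alternative algorithm.

-- ===== PORT A =====
-- permutacoes_chaves: recursion over the list, inner `for i in range(len(...))` loop as a foldl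
-- over the attached range (the attachment only carries the bound i < len, needed for termination).
def permsA (l : List String) : List (List String) :=
  if l.length = 0 then [[]]
  else
    (List.range l.length).attach.foldl
      (fun res i =>
        res ++ (permsA (l.take i.1 ++ l.drop (i.1 + 1))).map (fun perm => l.getD i.1 "" :: perm))
      []
termination_by l.length
decreasing_by
  have := List.mem_range.mp i.2
  simp [List.length_append, List.length_take, List.length_drop]
  omega

def gerar_caminhos (pares_ord : List String) : List (List String) :=
  -- pontos_intermediarios: append loop
  let pontos := pares_ord.foldl (fun acc p => if p ≠ "R" then acc ++ [p] else acc) []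
  let caminhos := permsA pontos
  -- caminhos_completos: append loop
  caminhos.foldl (fun acc caminho => acc ++ [["R"] ++ caminho ++ ["R"]]) []

-- ===== PORT B =====
-- total = n! computed by the `for i in range(1, n+1)` loop
def factB (n : Nat) : Nat := (List.range n).foldl (fun total i => total * (i + 1)) 1

-- the `while m > 0` unranking loop: state (f, k, restantes, perm); restantes.pop(d) is
-- getD d / eraseIdx d (d is in range whenever Python's pop succeeds)
def unrankB : Nat → Nat → Nat → List String → List String → List String
  | 0, _, _, _, perm => perm
  | m + 1, f, k, restantes, perm =>
      let f' := f / (m + 1)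
      unrankB m f' (k % f') (restantes.eraseIdx (k / f'))
        (perm ++ [restantes.getD (k / f') ""])

def gerar_caminhos_alt (pares_ord : List String) : List (List String) :=
  let pontos := pares_ord.filter (fun p => p ≠ "R")
  let total := factB pontos.length
  (List.range total).foldl
    (fun acc k => acc ++ [unrankB pontos.length total k pontos ["R"] ++ ["R"]]) []

-- ===== PRECONDITION & SPEC =====
def Spec_gerar_caminhos (pares_ord : List String) (out : List (List String)) : Prop := out = gerar_caminhos_alt pares_ord
instance (pares_ord : List String) (out : List (List String)) : Decidable (Spec_gerar_caminhos pares_ord out) := by unfold Spec_gerar_caminhos; infer_instance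

-- ===== CLAIM (what is proved, stated in full; the proofs are below) =====
def Claim_equal_gerar_caminhos : Prop := ∀ (pares_ord : List String), Dom_gerar_caminhos pares_ord → Spec_gerar_caminhos pares_ord (gerar_caminhos pares_ord)

-- ===== LEMMAS AND PROOFS =====

lemma factB_succ (n : Nat) : factB (n + 1) = factB n * (n + 1) := by
  simp [factB, List.range_succ]

lemma factB_pos (n : Nat) : 0 < factB n := by
  induction n with
  | zero => decide
  | succ m ih => rw [factB_succ]; positivity

-- accumulator lemma for the while-loop state `perm`
lemma unrankB_acc (m : Nat) : ∀ (f k : Nat) (r perm : List String),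
    unrankB m f k r perm = perm ++ unrankB m f k r [] := by
  induction m with
  | zero => intro f k r perm; simp [unrankB]
  | succ m ih =>
      intro f k r perm
      rw [unrankB, unrankB, ih _ _ _ (perm ++ _), ih _ _ _ ([] ++ _)]
      simp

-- range (a*c) enumerated as a flatMap of blocks of size c
lemma range_mul_flatMap (a c : Nat) :
    List.range (a * c) =
      (List.range a).flatMap (fun d => (List.range c).map (fun r => d * c + r)) := by
  induction a with
  | zero => simp
  | succ a ih =>
      rw [Nat.succ_mul, List.range_add, List.range_succ, List.flatMap_append, ← ih]
      simp [Nat.add_comm]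

-- flatMap over an attached list ignores the attachment
lemma flatMap_attach_fst {α β : Type} (l : List α) (g : α → List β) :
    l.attach.flatMap (fun i => g i.1) = l.flatMap g := by
  rw [List.flatMap_def, List.flatMap_def,
      show (fun i : {x // x ∈ l} => g i.1) = g ∘ Subtype.val from rfl,
      ← List.map_map, List.attach_map_subtype_val]

-- the inner foldl of permsA as a flatMap over the plain range
lemma permsA_nonempty (l : List String) (h : l.length ≠ 0) :
    permsA l =
      (List.range l.length).flatMap
        (fun i => (permsA (l.eraseIdx i)).map (fun perm => l.getD i "" :: perm)) := by
  rw [permsA, if_neg h, PySem.List.foldl_append_eq_flatMap, List.nil_append,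
      flatMap_attach_fst (List.range l.length)
        (fun i => (permsA (l.take i ++ l.drop (i + 1))).map (fun perm => l.getD i "" :: perm))]
  exact List.flatMap_congr (fun i _ => by rw [List.eraseIdx_eq_take_drop_succ])

-- core equivalence: the recursive generator equals the unranking enumeration
lemma perms_eq (n : Nat) : ∀ l : List String, l.length = n →
    permsA l =
      (List.range (factB n)).map (fun k => unrankB n (factB n) k l []) := by
  induction n with
  | zero =>
      intro l hl
      rw [List.length_eq_zero_iff.mp hl, permsA]
      simp [factB, unrankB]
  | succ m ih =>
      intro l hl
      have hc := factB_pos m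
      rw [permsA_nonempty l (by omega), hl]
      rw [factB_succ, Nat.mul_comm, range_mul_flatMap, List.map_flatMap]
      refine List.flatMap_congr (fun d hd => ?_)
      have hdlt : d < m + 1 := List.mem_range.mp hd
      have hlen : (l.eraseIdx d).length = m := by
        rw [List.length_eraseIdx_of_lt (by omega)]; omega
      rw [ih (l.eraseIdx d) hlen, List.map_map, List.map_map]
      refine List.map_congr_left (fun r hr => ?_)
      have hrlt : r < factB m := List.mem_range.mp hr
      have hdiv : (m + 1) * factB m / (m + 1) = factB m := Nat.mul_div_cancel_left _ (by omega)
      have hk : (d * factB m + r) / factB m = d := by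
        rw [Nat.mul_comm d, Nat.mul_add_div hc, Nat.div_eq_of_lt hrlt]; omega
      have hk2 : (d * factB m + r) % factB m = r := by
        rw [Nat.mul_comm d, Nat.mul_add_mod, Nat.mod_eq_of_lt hrlt]
      simp only [unrankB, hdiv, hk, hk2, Function.comp]
      conv_rhs => rw [unrankB_acc]
      simp

-- the two append loops of gerar_caminhos, as filter and map
lemma filter_loop (l : List String) :
    l.foldl (fun acc p => if p ≠ "R" then acc ++ [p] else acc) [] =
      l.filter (fun p => p ≠ "R") := by
  simpa using PySem.List.foldl_append_if (fun p : String => decide (p ≠ "R")) (fun p => p) l []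

lemma wrap_loop (cs : List (List String)) :
    cs.foldl (fun acc caminho => acc ++ [["R"] ++ caminho ++ ["R"]]) [] =
      cs.map (fun caminho => ["R"] ++ caminho ++ ["R"]) := by
  simpa using PySem.List.foldl_append_singleton_eq_map
    (fun caminho => ["R"] ++ caminho ++ ["R"]) cs []

-- the foldl-append loop of B, as a map over the range
lemma alt_loop (n total : Nat) (pontos : List String) :
    (List.range total).foldl
        (fun acc k => acc ++ [unrankB n total k pontos ["R"] ++ ["R"]]) [] =
      (List.range total).map (fun k => unrankB n total k pontos ["R"] ++ ["R"]) := by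
  simpa using PySem.List.foldl_append_singleton_eq_map
    (fun k => unrankB n total k pontos ["R"] ++ ["R"]) (List.range total) []

-- ===== VERDICT (by name: the statement is the Claim_ definition above) =====
theorem gerar_caminhos_spec : Claim_equal_gerar_caminhos := by
  intro pares_ord _
  show gerar_caminhos pares_ord = gerar_caminhos_alt pares_ord
  unfold gerar_caminhos gerar_caminhos_alt
  simp only [filter_loop, wrap_loop, alt_loop]
  rw [perms_eq _ _ rfl, List.map_map]
  refine List.map_congr_left (fun k _ => ?_)
  conv_rhs => rw [unrankB_acc]
  simp
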